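-- pv_equiv track=rewrite | github.com/AiZhanghan/Leetcode | 秋招/腾讯/4.py | func
-- ===== SOURCE A (Python) =====
-- def func(nums):
--     """
--     Args:
--         nums: list[int]
--
--     Return:
--         list[int]
--     """
--     nums_sorted = sorted(nums)
--     mid_index = len(nums) // 2
--     mid1 = nums_sorted[mid_index - 1]
--     mid2 = nums_sorted[mid_index]
--
--     res = []
--
--     for num in nums:
--         if num <= mid1:
--             res.append(mid2)
--         else:
--             res.append(mid1)
--     return res
-- ===== SOURCE B (Python) =====
-- def _kth(nums, k):
--     # k-th smallest (0-based) by iterative quickselect, middle-element pivot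
--     while True:
--         pivot = nums[len(nums) // 2]
--         less = [x for x in nums if x < pivot]
--         if k < len(less):
--             nums = less
--             continue
--         eq = 0
--         for x in nums:
--             if x == pivot:
--                 eq += 1
--         if k < len(less) + eq:
--             return pivot
--         k -= len(less) + eq
--         nums = [x for x in nums if x > pivot]
--
--
-- def func(nums):
--     n = len(nums)
--     if n == 1:
--         # a single element is its own median on both sides
--         return list(nums)
--     mid1 = _kth(nums, n // 2 - 1)
--     mid2 = _kth(nums, n // 2)
--     return [mid2 if x <= mid1 else mid1 for x in nums]
-- ===== Notes on version B (the rewrite author's own statement) =====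
-- stated objective: alternative
-- what changed: B finds the two middle order statistics with an iterative three-way-partition quickselect (middle-element pivot) and then maps once over the input, instead of A's full sort followed by an append loop.
import Mathlib
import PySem

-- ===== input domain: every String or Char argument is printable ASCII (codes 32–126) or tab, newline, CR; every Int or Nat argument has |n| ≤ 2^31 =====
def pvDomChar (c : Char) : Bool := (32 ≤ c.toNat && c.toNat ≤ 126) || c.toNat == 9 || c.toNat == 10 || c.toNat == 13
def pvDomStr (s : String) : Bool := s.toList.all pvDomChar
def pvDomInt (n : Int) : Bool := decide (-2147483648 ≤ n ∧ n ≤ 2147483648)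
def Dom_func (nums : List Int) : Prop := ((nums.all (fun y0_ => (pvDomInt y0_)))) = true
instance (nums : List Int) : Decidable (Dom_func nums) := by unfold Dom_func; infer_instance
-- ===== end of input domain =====

-- B replaces A's full sort with an iterative quickselect for the two middle order
-- statistics followed by one map pass (objective: alternative algorithm).

-- ===== PORT A =====
def func (nums : List Int) : List Int :=
  let numsSorted := PySem.List.sorted nums (fun x => x) false
  let midIndex := PySem.Int.floordiv (PySem.List.len nums) 2
  match PySem.List.pyGet? numsSorted (midIndex - 1), PySem.List.pyGet? numsSorted midIndex with
  | some mid1, some mid2 =>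
      nums.foldl (fun res num => if num ≤ mid1 then res ++ [mid2] else res ++ [mid1]) []
  | _, _ => []

-- ===== PORT B =====
-- Source B's while-loop quickselect, ported as the equivalent tail recursion on (nums, k)
def kthSel (nums : List Int) (k : Nat) : Int :=
  if hnil : nums = [] then 0
  else
    let pivot := nums.getD (nums.length / 2) 0
    let less := nums.filter (fun x => decide (x < pivot))
    if k < less.length then kthSel less k
    else
      let eqc := nums.countP (fun x => x == pivot)
      if k < less.length + eqc then pivot
      else kthSel (nums.filter (fun x => decide (pivot < x))) (k - (less.length + eqc))
termination_by nums.length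
decreasing_by
  · have hm : nums.getD (nums.length / 2) 0 ∈ nums := by
      rw [List.getD_eq_getElem _ _ (Nat.div_lt_self (List.length_pos_iff.mpr hnil) (by omega))]
      exact List.getElem_mem _
    simp
    have h2 : (List.filter (fun x : {x // x ∈ nums} => decide (↑x < nums[nums.length / 2]?.getD 0)) nums.attach).length < nums.attach.length :=
      List.length_filter_lt_length_iff_exists.mpr ⟨⟨_, by simpa using hm⟩, List.mem_attach _ _, by simp⟩
    simpa using h2
  · have hm : nums.getD (nums.length / 2) 0 ∈ nums := by
      rw [List.getD_eq_getElem _ _ (Nat.div_lt_self (List.length_pos_iff.mpr hnil) (by omega))]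
      exact List.getElem_mem _
    simp
    have h2 : (List.filter (fun x : {x // x ∈ nums} => decide (nums[nums.length / 2]?.getD 0 < ↑x)) nums.attach).length < nums.attach.length :=
      List.length_filter_lt_length_iff_exists.mpr ⟨⟨_, by simpa using hm⟩, List.mem_attach _ _, by simp⟩
    simpa using h2

def func_alt (nums : List Int) : List Int :=
  let n := nums.length
  if n = 1 then nums
  else
    let mid1 := kthSel nums (n / 2 - 1)
    let mid2 := kthSel nums (n / 2)
    nums.map (fun x => if x ≤ mid1 then mid2 else mid1)

-- ===== PRECONDITION & SPEC =====
-- Pre_ excludes only the empty list, on which A raises IndexError.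
def Pre_func (nums : List Int) : Prop := nums ≠ []
instance (nums : List Int) : Decidable (Pre_func nums) := by unfold Pre_func; infer_instance
def pvWitness_func : List Int := [3, 1, 2, 4]
def Spec_func (nums : List Int) (out : List Int) : Prop := out = func_alt nums
instance (nums : List Int) (out : List Int) : Decidable (Spec_func nums out) := by unfold Spec_func; infer_instance

-- ===== CLAIM (what is proved, stated in full; the proofs are below) =====
def Claim_equal_func : Prop := ∀ (nums : List Int), Dom_func nums → Pre_func nums → Spec_func nums (func nums)

-- ===== LEMMAS AND PROOFS =====

lemma perm_three (l : List Int) (p : Int) :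
    (l.filter (fun x => decide (x < p)) ++ l.filter (fun x => x == p) ++ l.filter (fun x => decide (p < x))).Perm l := by
  induction l with
  | nil => simp
  | cons a t ih =>
    rcases lt_trichotomy a p with h | h | h
    · simpa [List.filter_cons, h, not_lt.mpr h.le, h.ne] using ih.cons a
    · subst h
      simp only [List.filter_cons, lt_irrefl, beq_self_eq_true, if_pos, decide_false,
        Bool.false_eq_true, if_neg, not_false_eq_true]
      rw [List.append_assoc, List.cons_append]
      exact List.perm_middle.trans (by simpa [List.append_assoc] using ih.cons a)
    · have hne : ¬ (a < p) := not_lt.mpr h.le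
      simp only [List.filter_cons, hne, decide_false, Bool.false_eq_true, if_neg, beq_iff_eq,
        h.ne', not_false_eq_true, h, decide_true, if_pos]
      exact List.perm_middle.trans (ih.cons a)

lemma sorted_decomp (l : List Int) (p : Int) :
    PySem.List.sorted l (fun x => x) false =
      PySem.List.sorted (l.filter (fun x => decide (x < p))) (fun x => x) false
      ++ List.replicate (l.countP (fun x => x == p)) p
      ++ PySem.List.sorted (l.filter (fun x => decide (p < x))) (fun x => x) false := by
  apply PySem.List.sorted_id_eq_of_perm_of_pairwise
  · have hrep : List.replicate (l.countP (fun x => x == p)) p = l.filter (fun x => x == p) := by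
      rw [List.filter_beq]
      simp [List.count_eq_countP]
    rw [hrep]
    exact (((PySem.List.sorted_perm _ _ _).append (List.Perm.refl _)).append (PySem.List.sorted_perm _ _ _)).trans (perm_three l p)
  · rw [List.append_assoc, List.pairwise_append, List.pairwise_append]
    refine ⟨PySem.List.sorted_pairwise _ _, ⟨List.pairwise_replicate.mpr (by simp), PySem.List.sorted_pairwise _ _, ?_⟩, ?_⟩
    · intro x hx y hy
      have := (List.eq_of_mem_replicate hx)
      rw [PySem.List.mem_sorted] at hy
      have hyy := hy
      rw [List.mem_filter] at hyy
      simp at hyy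
      omega
    · intro x hx y hy
      rw [PySem.List.mem_sorted] at hx
      have hxx := hx
      rw [List.mem_filter] at hxx
      simp at hxx
      rcases List.mem_append.mp hy with h | h
      · have := List.eq_of_mem_replicate h; omega
      · rw [PySem.List.mem_sorted] at h
        have hyy := h
        rw [List.mem_filter] at hyy
        simp at hyy
        omega

lemma kth_eq (l : List Int) (k : Nat) (hk : k < l.length) :
    kthSel l k = (PySem.List.sorted l (fun x => x) false).getD k 0 := by
  have hnil : l ≠ [] := by intro h; subst h; simp at hk
  have hpm : l.getD (l.length / 2) 0 ∈ l := by
    rw [List.getD_eq_getElem _ _ (Nat.div_lt_self (List.length_pos_iff.mpr hnil) (by omega))]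
    exact List.getElem_mem _
  rw [kthSel, dif_neg hnil]
  simp only []
  set p := l.getD (l.length / 2) 0 with hp
  set s1 := PySem.List.sorted (l.filter (fun x => decide (x < p))) (fun x => x) false with hs1
  set rep := List.replicate (l.countP (fun x => x == p)) p with hrep
  set s3 := PySem.List.sorted (l.filter (fun x => decide (p < x))) (fun x => x) false with hs3
  have hdec : PySem.List.sorted l (fun x => x) false = s1 ++ rep ++ s3 := sorted_decomp l p
  have hlen1 : s1.length = (l.filter (fun x => decide (x < p))).length := PySem.List.length_sorted _ _ _
  have hlen2 : rep.length = l.countP (fun x => x == p) := List.length_replicate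
  have hlen3 : s3.length = (l.filter (fun x => decide (p < x))).length := PySem.List.length_sorted _ _ _
  have htot : l.length = s1.length + rep.length + s3.length := by
    have := congrArg List.length hdec
    simp only [List.length_append, PySem.List.length_sorted] at this
    omega
  have hplt : (l.filter (fun x => decide (x < p))).length < l.length :=
    List.length_filter_lt_length_iff_exists.mpr ⟨p, hpm, by simp⟩
  have hglt : (l.filter (fun x => decide (p < x))).length < l.length :=
    List.length_filter_lt_length_iff_exists.mpr ⟨p, hpm, by simp⟩
  by_cases h1 : k < (l.filter (fun x => decide (x < p))).length
  · rw [if_pos h1, hdec, List.append_assoc, List.getD_append _ _ _ _ (by omega)]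
    exact kth_eq _ k h1
  · rw [if_neg h1]
    by_cases h2 : k < (l.filter (fun x => decide (x < p))).length + l.countP (fun x => x == p)
    · rw [if_pos h2, hdec, List.append_assoc, List.getD_append_right _ _ _ _ (by omega),
        List.getD_append _ _ _ _ (by omega)]
      rw [hrep, List.getD_replicate]
      omega
    · rw [if_neg h2, hdec, List.getD_append_right _ _ _ _ (by simp only [List.length_append]; omega)]
      have hidx : k - (s1 ++ rep).length = k - ((l.filter (fun x => decide (x < p))).length + l.countP (fun x => x == p)) := by
        simp only [List.length_append]; omega
      rw [hidx]
      exact kth_eq _ _ (by omega)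
termination_by l.length
decreasing_by
  · exact hplt
  · exact hglt

lemma main_two (nums : List Int) (h2 : 2 ≤ nums.length) : func nums = func_alt nums := by
  have hm1 : 1 ≤ nums.length / 2 := by omega
  have hmlt : nums.length / 2 < nums.length := Nat.div_lt_self (by omega) (by omega)
  have hslen : (PySem.List.sorted nums (fun x => x) false).length = nums.length :=
    PySem.List.length_sorted _ _ _
  unfold func func_alt
  simp only [PySem.List.len_eq]
  rw [show PySem.Int.floordiv (nums.length : Int) 2 = ((nums.length / 2 : Nat) : Int) from by
    exact_mod_cast PySem.Int.floordiv_natCast nums.length 2]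
  rw [show ((nums.length / 2 : Nat) : Int) - 1 = ((nums.length / 2 - 1 : Nat) : Int) from by
    push_cast [hm1]; omega]
  rw [PySem.List.pyGet?_natCast, PySem.List.pyGet?_natCast]
  rw [List.getElem?_eq_getElem (by omega), List.getElem?_eq_getElem (by omega)]
  simp only []
  rw [show (fun (res : List Int) num =>
        if num ≤ (PySem.List.sorted nums (fun x => x) false)[nums.length / 2 - 1] then
          res ++ [(PySem.List.sorted nums (fun x => x) false)[nums.length / 2]]
        else res ++ [(PySem.List.sorted nums (fun x => x) false)[nums.length / 2 - 1]])
      = fun (res : List Int) num => res ++ [if num ≤ (PySem.List.sorted nums (fun x => x) false)[nums.length / 2 - 1] then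
          (PySem.List.sorted nums (fun x => x) false)[nums.length / 2]
        else (PySem.List.sorted nums (fun x => x) false)[nums.length / 2 - 1]] from by
    funext res num; split <;> rfl]
  rw [PySem.List.foldl_append_singleton_eq_map]
  rw [if_neg (by omega)]
  rw [kth_eq nums (nums.length / 2 - 1) (by omega), kth_eq nums (nums.length / 2) hmlt]
  rw [List.getD_eq_getElem _ _ (by omega), List.getD_eq_getElem _ _ (by omega)]
  simp

lemma main_one (a : Int) : func [a] = func_alt [a] := by
  have hs : PySem.List.sorted [a] (fun x => x) false = [a] :=
    PySem.List.sorted_eq_self_of_pairwise [a] (fun x => x) (by simp)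
  unfold func func_alt
  simp [hs, PySem.List.pyGet?_neg_one]

-- ===== VERDICT (by name: the statement is the Claim_ definition above) =====
theorem func_spec : Claim_equal_func := by
  intro nums _hd hpre
  unfold Spec_func
  match nums with
  | [] => exact absurd rfl hpre
  | [a] => exact main_one a
  | a :: b :: t => exact main_two _ (by simp)
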